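-- pv_equiv track=rewrite | github.com/m1sterzer0/codejams | 2013/1A/B.py | solve
-- ===== SOURCE A (Python) =====
-- def solve(inp) :
--     (e,r,n,v) = inp
--     energy = e
--     value = 0
--     maxDuration = localMaxDuration(v)
--     for i,x in enumerate(v) :
--         md = maxDuration[i]
--         nextBest = i+md
--         energyToSpend = energy if nextBest >= n else energy + md * r - e
--         if energyToSpend < 0 : energyToSpend = 0
--         if energyToSpend > energy : energyToSpend = energy
--         value += energyToSpend * x
--         energy = energy - energyToSpend + r
--         if energy > e : energy = e  ## Poorly constrained problem, sometimes r > e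
--     return str(value)
--
-- def stockSpan(v):
--     span = [0] * len(v)
--     s = []
--     for i,x in enumerate(v) :
--         while (s and x >= s[-1][1]) : s.pop()
--         span[i] = i+1 if not s else i - s[-1][0]
--         s.append((i,x))
--     return span
--
-- def localMaxDuration(v) :
--     vrev = list(reversed(v))
--     spanrev = stockSpan(vrev)
--     span = list(reversed(spanrev))
--     return span
-- ===== SOURCE B (Python) =====
-- def solve(inp):
--     (e, r, n, v) = inp
--     energy = e
--     value = 0
--     for i, x in enumerate(v):
--         # scan right for the first strictly greater value (no stack, no reversals)
--         j = i + 1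
--         while j < len(v) and v[j] <= x:
--             j += 1
--         md = j - i
--         spend = energy if i + md >= n else energy + md * r - e
--         spend = min(energy, max(0, spend))
--         value += spend * x
--         energy = min(e, energy - spend + r)
--     return str(value)
-- ===== Notes on version B (the rewrite author's own statement) =====
-- stated objective: simpler
-- what changed: Replaces the reverse/stock-span-stack/reverse construction of the maxDuration table by an inline forward scan for the first strictly greater element, computed per index inside the single scheduling loop, and folds A's sequential clamp ifs into min/max.
import Mathlib
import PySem

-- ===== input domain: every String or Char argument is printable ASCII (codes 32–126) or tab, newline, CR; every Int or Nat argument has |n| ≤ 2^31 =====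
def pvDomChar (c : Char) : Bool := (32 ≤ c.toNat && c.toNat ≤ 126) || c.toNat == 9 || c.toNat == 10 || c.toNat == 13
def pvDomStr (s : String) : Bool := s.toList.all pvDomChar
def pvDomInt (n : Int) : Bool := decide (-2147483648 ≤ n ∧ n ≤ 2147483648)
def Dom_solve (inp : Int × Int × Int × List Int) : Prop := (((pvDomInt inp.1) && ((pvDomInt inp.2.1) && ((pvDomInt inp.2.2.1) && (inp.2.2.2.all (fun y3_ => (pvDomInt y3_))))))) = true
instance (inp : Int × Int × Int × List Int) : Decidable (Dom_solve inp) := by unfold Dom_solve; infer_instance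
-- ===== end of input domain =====

-- B replaces A's reverse/stock-span-stack/reverse table build by an inline forward scan
-- for the first strictly greater element (objective: simpler; same return value).

-- ===== PORT A =====
-- Python's `while (s and x >= s[-1][1]) : s.pop()`; the stack top (Python list end) is the Lean list head.
def pyPopLoop (x : Int) (s : List (Int × Int)) : List (Int × Int) :=
  match s with
  | [] => []
  | p :: rest => if x ≥ p.2 then pyPopLoop x rest else p :: rest

-- loop body of stockSpan; `.toNat` on the enumerate index is exact since it is ≥ 0
def stockSpanStep (acc : List Int × List (Int × Int)) (ix : Int × Int) : List Int × List (Int × Int) :=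
  let s := pyPopLoop ix.2 acc.2
  let d : Int := if s.isEmpty then ix.1 + 1 else ix.1 - (s.headD (0, 0)).1
  (acc.1.set ix.1.toNat d, (ix.1, ix.2) :: s)

def stockSpan (v : List Int) : List Int :=
  ((PySem.List.enumerate v 0).foldl stockSpanStep (List.replicate v.length 0, [])).1

def localMaxDuration (v : List Int) : List Int :=
  (stockSpan v.reverse).reverse

def solveStep (e r n : Int) (md : List Int) (acc : Int × Int) (ix : Int × Int) : Int × Int :=
  let d := md.getD ix.1.toNat 0      -- maxDuration[i]; i is the enumerate index, 0 ≤ i < len(v)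
  let nextBest := ix.1 + d
  let t0 := if nextBest ≥ n then acc.1 else acc.1 + d * r - e
  let t1 := if t0 < 0 then 0 else t0
  let t2 := if t1 > acc.1 then acc.1 else t1
  let value := acc.2 + t2 * ix.2
  let energy := acc.1 - t2 + r
  (if energy > e then e else energy, value)

def solve (inp : Int × Int × Int × List Int) : String :=
  let md := localMaxDuration inp.2.2.2
  PySem.Int.toStr ((PySem.List.enumerate inp.2.2.2 0).foldl
    (solveStep inp.1 inp.2.1 inp.2.2.1 md) (inp.1, 0)).2

-- ===== PORT B =====
-- the `while j < len(v) and v[j] <= x: j += 1` loop of Source B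
def scanJ (v : List Int) (x : Int) (j : Nat) : Nat :=
  if h : j < v.length then (if v[j] ≤ x then scanJ v x (j + 1) else j) else j
termination_by v.length - j

def solveAltStep (e r n : Int) (v : List Int) (acc : Int × Int) (ix : Int × Int) : Int × Int :=
  let j := scanJ v ix.2 (ix.1.toNat + 1)   -- index ≥ 0, so .toNat is exact
  let md : Int := (j : Int) - ix.1
  let spend0 := if ix.1 + md ≥ n then acc.1 else acc.1 + md * r - e
  let spend := min acc.1 (max 0 spend0)
  (min e (acc.1 - spend + r), acc.2 + spend * ix.2)

def solve_alt (inp : Int × Int × Int × List Int) : String :=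
  PySem.Int.toStr ((PySem.List.enumerate inp.2.2.2 0).foldl
    (solveAltStep inp.1 inp.2.1 inp.2.2.1 inp.2.2.2) (inp.1, 0)).2

-- ===== PRECONDITION & SPEC =====
def Spec_solve (inp : Int × Int × Int × List Int) (out : String) : Prop := out = solve_alt inp
instance (inp : Int × Int × Int × List Int) (out : String) : Decidable (Spec_solve inp out) := by unfold Spec_solve; infer_instance

-- ===== CLAIM (what is proved, stated in full; the proofs are below) =====
def Claim_equal_solve : Prop := ∀ (inp : Int × Int × Int × List Int), Dom_solve inp → Spec_solve inp (solve inp)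

-- ===== LEMMAS AND PROOFS =====

-- length of the "takeWhile ≤ x" run at the right end of u
def twl (u : List Int) (x : Int) : Nat := (u.reverse.takeWhile (fun z => decide (z ≤ x))).length

-- the stack component of the stockSpan fold
def stk (u : List Int) : List (Int × Int) :=
  ((PySem.List.enumerate u 0).foldl stockSpanStep (List.replicate u.length 0, [])).2

lemma scanJ_eq (v : List Int) (x : Int) (j : Nat) :
    scanJ v x j = j + ((v.drop j).takeWhile (fun z => decide (z ≤ x))).length := by
  rw [scanJ]
  split
  · rename_i h
    rw [List.drop_eq_getElem_cons h, List.takeWhile_cons]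
    split
    · rename_i hle
      rw [scanJ_eq v x (j + 1)]
      simp [hle]
      omega
    · rename_i hgt
      simp [hgt]
  · rename_i h
    have hd : v.drop j = [] := List.drop_eq_nil_of_le (by omega)
    simp [hd]
termination_by v.length - j

lemma pop_pop (x y : Int) (h : y ≤ x) (s : List (Int × Int)) :
    pyPopLoop x (pyPopLoop y s) = pyPopLoop x s := by
  induction s with
  | nil => simp [pyPopLoop]
  | cons p rest ih =>
    by_cases hp : y ≥ p.2
    · have hx : x ≥ p.2 := by omega
      simp [pyPopLoop, hp, hx, ih]
    · simp [pyPopLoop, hp]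

lemma foldl_step_len (l : List (Int × Int)) (z : List Int) (s0 : List (Int × Int)) :
    (l.foldl stockSpanStep (z, s0)).1.length = z.length := by
  induction l generalizing z s0 with
  | nil => simp
  | cons p rest ih =>
    simp only [List.foldl_cons]
    rw [ih]
    simp [stockSpanStep]

lemma foldl_step_append (l : List (Int × Int)) (z : List Int) (c : Int) (s0 : List (Int × Int))
    (hb : ∀ p ∈ l, 0 ≤ p.1 ∧ p.1.toNat < z.length) :
    l.foldl stockSpanStep (z ++ [c], s0) =
      ((l.foldl stockSpanStep (z, s0)).1 ++ [c], (l.foldl stockSpanStep (z, s0)).2) := by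
  induction l generalizing z s0 with
  | nil => simp
  | cons p rest ih =>
    have hb0 := hb p (by simp)
    simp only [List.foldl_cons]
    have hset : stockSpanStep (z ++ [c], s0) p =
        ((stockSpanStep (z, s0) p).1 ++ [c], (stockSpanStep (z, s0) p).2) := by
      simp only [stockSpanStep, List.set_append]
      rw [if_pos hb0.2]
    rw [hset]
    have : (stockSpanStep (z, s0) p).1.length = z.length := by simp [stockSpanStep]
    rw [ih (stockSpanStep (z, s0) p).1 (stockSpanStep (z, s0) p).2
      (fun q hq => by have := hb q (by simp [hq]); omega)]

lemma stockSpan_len (u : List Int) : (stockSpan u).length = u.length := by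
  rw [stockSpan, foldl_step_len]
  simp

-- the value assigned to the last slot when appending x
def dval (u : List Int) (x : Int) : Int :=
  if (pyPopLoop x (stk u)).isEmpty then (u.length : Int) + 1
  else (u.length : Int) - ((pyPopLoop x (stk u)).headD (0, 0)).1

lemma snoc_fold (u : List Int) (x : Int) :
    stockSpan (u ++ [x]) = stockSpan u ++ [dval u x] ∧
    stk (u ++ [x]) = ((u.length : Int), x) :: pyPopLoop x (stk u) := by
  have henum : PySem.List.enumerate (u ++ [x]) 0
      = PySem.List.enumerate u 0 ++ [((u.length : Int), x)] := by
    rw [PySem.List.enumerate_append]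
    simp [PySem.List.enumerate_cons, PySem.List.enumerate_nil]
  have hb : ∀ p ∈ PySem.List.enumerate u 0,
      0 ≤ p.1 ∧ p.1.toNat < (List.replicate u.length (0 : Int)).length := by
    intro p hp
    rw [PySem.List.mem_enumerate_iff] at hp
    obtain ⟨k, hk, rfl⟩ := hp
    simp
    omega
  have hl : ((PySem.List.enumerate u 0).foldl stockSpanStep
      (List.replicate u.length 0, ([] : List (Int × Int)))).1.length = u.length := by
    rw [foldl_step_len]; simp
  unfold stockSpan stk dval
  rw [show (u ++ [x]).length = u.length + 1 by simp, henum, List.replicate_succ',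
    List.foldl_append, foldl_step_append _ _ _ _ hb]
  simp only [List.foldl_cons, List.foldl_nil, stockSpanStep]
  constructor
  · rw [List.set_append, if_neg (by simp [hl])]
    simp [hl, stk]
  · simp

lemma stk_inv (u : List Int) : ∀ x : Int,
    (pyPopLoop x (stk u) = [] → twl u x = u.length) ∧
    (∀ p rest, pyPopLoop x (stk u) = p :: rest →
      twl u x < u.length ∧ p.1 = (u.length : Int) - 1 - (twl u x : Int)) := by
  induction u using List.reverseRecOn with
  | nil =>
    intro x
    have h0 : stk [] = [] := by simp [stk, PySem.List.enumerate_nil]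
    refine ⟨fun _ => by simp [twl], fun p rest hp => by rw [h0] at hp; simp [pyPopLoop] at hp⟩
  | append_singleton u y ih =>
    intro x
    rw [(snoc_fold u y).2]
    have hrev : (u ++ [y]).reverse = y :: u.reverse := by simp
    by_cases hxy : x ≥ y
    · have hcomp : pyPopLoop x (pyPopLoop y (stk u)) = pyPopLoop x (stk u) :=
        pop_pop x y hxy (stk u)
      have htw : twl (u ++ [y]) x = twl u x + 1 := by
        simp [twl, hrev, hxy]
      simp only [pyPopLoop, if_pos hxy, hcomp]
      refine ⟨fun h => ?_, fun p rest hp => ?_⟩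
      · have := (ih x).1 h
        simp [htw, this]
      · have := (ih x).2 p rest hp
        constructor
        · simp [htw]; omega
        · simp [htw]
          omega
    · simp only [pyPopLoop, if_neg hxy]
      have htw : twl (u ++ [y]) x = 0 := by
        have : ¬ (y ≤ x) := hxy
        simp [twl, hrev, this]
      refine ⟨fun h => by simp at h, fun p rest hp => ?_⟩
      · have : p = ((u.length : Int), y) := by
          have := List.cons.injEq .. ▸ hp
          simp at hp
          exact hp.1.symm ▸ rfl
        subst this
        simp [htw]

lemma dval_eq (u : List Int) (x : Int) : dval u x = 1 + (twl u x : Int) := by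
  unfold dval
  cases hs : pyPopLoop x (stk u) with
  | nil =>
    have := (stk_inv u x).1 hs
    simp [this]
    omega
  | cons p rest =>
    have h2 := (stk_inv u x).2 p rest hs
    simp
    omega

lemma master (w : List Int) : ∀ k (h : k < w.length),
    (stockSpan w).getD k 0 = 1 + (twl (w.take k) (w[k]) : Int) := by
  induction w using List.reverseRecOn with
  | nil => intro k h; simp at h
  | append_singleton u x ih =>
    intro k h
    rw [(snoc_fold u x).1]
    have hlen : (stockSpan u).length = u.length := stockSpan_len u
    by_cases hk : k < u.length
    · have h1 : (u ++ [x])[k] = u[k] := List.getElem_append_left hk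
      rw [List.getD_append _ _ _ _ (by omega), List.take_append_of_le_length hk.le, h1,
        ih k hk]
    · have hk' : k = u.length := by simp at h; omega
      subst hk'
      rw [List.getD_append_right _ _ _ _ (by omega)]
      have h2 : (u ++ [x])[u.length] = x := List.getElem_concat_length rfl _
      have h3 : (u ++ [x]).take u.length = u := by
        rw [List.take_append_of_le_length le_rfl, List.take_length]
      rw [h2, h3, hlen]
      simp [dval_eq]

lemma table_eq (v : List Int) (i : Nat) (h : i < v.length) :
    (localMaxDuration v).getD i 0
      = 1 + (((v.drop (i + 1)).takeWhile (fun z => decide (z ≤ v[i]))).length : Int) := by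
  unfold localMaxDuration
  have hlen : (stockSpan v.reverse).length = v.length := by rw [stockSpan_len]; simp
  have hi : i < (stockSpan v.reverse).reverse.length := by simp [hlen]; omega
  have hk : v.length - 1 - i < (stockSpan v.reverse).length := by omega
  rw [List.getD_eq_getElem _ _ hi, List.getElem_reverse,
    ← List.getD_eq_getElem _ (0 : Int) (by omega)]
  rw [hlen, master v.reverse (v.length - 1 - i) (by simp; omega)]
  have hx : (v.reverse)[v.length - 1 - i]'(by simp; omega) = v[i] := by
    rw [List.getElem_reverse]
    congr 1
    omega
  have ht : ((v.reverse.take (v.length - 1 - i)).reverse) = v.drop (i + 1) := by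
    rw [List.reverse_take, List.reverse_reverse]
    congr 1
    simp
    omega
  rw [twl, hx, ht]

-- ===== VERDICT (by name: the statement is the Claim_ definition above) =====
theorem solve_spec : Claim_equal_solve := by
  intro inp _
  unfold Spec_solve solve solve_alt
  have hfold : (PySem.List.enumerate inp.2.2.2 0).foldl
      (solveStep inp.1 inp.2.1 inp.2.2.1 (localMaxDuration inp.2.2.2)) (inp.1, 0)
      = (PySem.List.enumerate inp.2.2.2 0).foldl
      (solveAltStep inp.1 inp.2.1 inp.2.2.1 inp.2.2.2) (inp.1, 0) := by
    apply PySem.List.foldl_congr_mem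
    intro acc p hp
    rw [PySem.List.mem_enumerate_iff] at hp
    obtain ⟨k, hk, rfl⟩ := hp
    have hd := table_eq inp.2.2.2 k hk
    have hs := scanJ_eq inp.2.2.2 (inp.2.2.2[k]) (k + 1)
    simp only [solveStep, solveAltStep, zero_add, Int.toNat_natCast, hd, hs]
    have hmd : ((k + 1 + ((inp.2.2.2.drop (k + 1)).takeWhile
        (fun z => decide (z ≤ inp.2.2.2[k]))).length : Nat) : Int) - (k : Int)
        = 1 + (((inp.2.2.2.drop (k + 1)).takeWhile
        (fun z => decide (z ≤ inp.2.2.2[k]))).length : Int) := by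
      push_cast; ring
    rw [hmd]
    generalize (1 + (((inp.2.2.2.drop (k + 1)).takeWhile
        (fun z => decide (z ≤ inp.2.2.2[k]))).length : Int)) = m
    generalize (if (k : Int) + m ≥ inp.2.2.1 then acc.1
        else acc.1 + m * inp.2.1 - inp.1) = t0
    have hclamp : (if (if t0 < 0 then 0 else t0) > acc.1 then acc.1
        else if t0 < 0 then 0 else t0) = min acc.1 (max 0 t0) := by
      simp only [min_def, max_def]
      split_ifs <;> omega
    rw [hclamp]
    have hen : (if acc.1 - min acc.1 (max 0 t0) + inp.2.1 > inp.1 then inp.1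
        else acc.1 - min acc.1 (max 0 t0) + inp.2.1)
        = min inp.1 (acc.1 - min acc.1 (max 0 t0) + inp.2.1) := by
      simp only [min_def, max_def]
      split_ifs <;> omega
    rw [hen]
  exact congrArg (fun t => PySem.Int.toStr t.2) hfold
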